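-- pv_equiv track=rewrite | github.com/Garkun-r/LiveKit | agents/main-bot/src/robot_tags.py | strip_bracketed_segments
-- ===== SOURCE A (Python) =====
-- def strip_bracketed_segments(text: str) -> str:
--     """Remove all square-bracketed segments without leaving tag-only spacing."""
--     output: list[str] = []
--     pending_ws: list[str] = []
--     in_brackets = False
--
--     for char in text:
--         if in_brackets:
--             if char == "]":
--                 in_brackets = False
--             continue
--
--         if char == "[":
--             pending_ws.clear()
--             in_brackets = True
--             continue
--
--         if char.isspace():
--             pending_ws.append(char)
--             continue
--
--         if pending_ws:
--             output.extend(pending_ws)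
--             pending_ws.clear()
--         output.append(char)
--
--     if not in_brackets and pending_ws:
--         output.extend(pending_ws)
--
--     return "".join(output).strip()
-- ===== SOURCE B (Python) =====
-- def strip_bracketed_segments(text: str) -> str:
--     """Remove all square-bracketed segments without leaving tag-only spacing.
--
--     Span-based: jump between bracket delimiters with str.find instead of a
--     per-character state machine.
--     """
--     chunks: list[str] = []
--     cursor = 0
--     while True:
--         open_idx = text.find("[", cursor)
--         if open_idx == -1:
--             chunks.append(text[cursor:])
--             break
--         chunks.append(text[cursor:open_idx].rstrip())
--         close_idx = text.find("]", open_idx + 1)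
--         if close_idx == -1:
--             break
--         cursor = close_idx + 1
--     return "".join(chunks).strip()
-- ===== Notes on version B (the rewrite author's own statement) =====
-- stated objective: faster
-- what changed: Replaced the per-character state machine (flags, pending-whitespace buffer) by a span-based scan that jumps between '[' and ']' with str.find, appending rstripped inter-bracket slices and stripping the joined result.
import Mathlib
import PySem

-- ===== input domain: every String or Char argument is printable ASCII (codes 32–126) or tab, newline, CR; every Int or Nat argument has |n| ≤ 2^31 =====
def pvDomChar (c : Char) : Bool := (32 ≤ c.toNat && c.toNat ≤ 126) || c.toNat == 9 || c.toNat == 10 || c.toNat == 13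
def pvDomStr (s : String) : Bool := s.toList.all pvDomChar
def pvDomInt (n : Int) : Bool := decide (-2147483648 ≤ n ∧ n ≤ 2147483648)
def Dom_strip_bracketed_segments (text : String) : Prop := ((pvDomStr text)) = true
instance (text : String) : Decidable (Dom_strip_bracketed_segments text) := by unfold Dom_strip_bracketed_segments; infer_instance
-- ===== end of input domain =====

-- B replaces A's per-character state machine by a span scan that jumps between
-- bracket delimiters (str.find / slices), which is measurably faster in Python
-- by a constant factor; return values proved identical on all inputs.

-- ===== PORT A =====
-- one step of A's for-loop: state = (output, pending_ws, in_brackets)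
def pvAStep (s : List Char × List Char × Bool) (c : Char) : List Char × List Char × Bool :=
  match s with
  | (output, pending, inb) =>
    if inb then
      if c = ']' then (output, pending, false) else (output, pending, true)
    else if c = '[' then (output, [], true)
    else if PySem.Chars.isspace c then (output, pending ++ [c], inb)
    else (output ++ pending ++ [c], [], inb)

-- A's epilogue: "if not in_brackets and pending_ws: output.extend(pending_ws)"
def pvAssemble (s : List Char × List Char × Bool) : List Char :=
  if s.2.2 = false ∧ s.2.1 ≠ [] then s.1 ++ s.2.1 else s.1

def strip_bracketed_segments (text : String) : String :=
  PySem.Str.strip (String.ofList (pvAssemble (text.toList.foldl pvAStep ([], [], false))))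

-- ===== PORT B =====
-- Source B's cursor loop on text[cursor:] as a suffix recursion:
-- text.find('[', cursor) == -1  ⟷  dropWhile (· ≠ '[') of the suffix is empty;
-- text[cursor:open_idx] is the takeWhile part, text[close_idx+1:] the tail after ']'.
def pvBLoop (l : List Char) : List Char :=
  if h : (l.dropWhile (fun c => !(c == '['))) = [] then
    l
  else
    PySem.Chars.rstrip (l.takeWhile (fun c => !(c == '['))) ++
      (if h2 : ((l.dropWhile (fun c => !(c == '['))).tail.dropWhile (fun c => !(c == ']'))) = [] then
        []
      else
        pvBLoop ((l.dropWhile (fun c => !(c == '['))).tail.dropWhile (fun c => !(c == ']'))).tail)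
  termination_by l.length
  decreasing_by
    have a1 := List.length_dropWhile_le (fun c => !(c == '[')) l
    have a2 := List.length_dropWhile_le (fun c => !(c == ']')) ((l.dropWhile (fun c => !(c == '['))).tail)
    have e1 : (l.dropWhile (fun c => !(c == '['))).length ≠ 0 := by
      simpa [List.length_eq_zero_iff] using h
    have e2 : ((l.dropWhile (fun c => !(c == '['))).tail.dropWhile (fun c => !(c == ']'))).length ≠ 0 := by
      simpa [List.length_eq_zero_iff] using h2
    simp only [List.length_tail] at *
    omega

def strip_bracketed_segments_alt (text : String) : String :=
  PySem.Str.strip (String.ofList (pvBLoop text.toList))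

-- ===== PRECONDITION & SPEC =====
def Spec_strip_bracketed_segments (text : String) (out : String) : Prop := out = strip_bracketed_segments_alt text
instance (text : String) (out : String) : Decidable (Spec_strip_bracketed_segments text out) := by unfold Spec_strip_bracketed_segments; infer_instance

-- ===== CLAIM (what is proved, stated in full; the proofs are below) =====
def Claim_equal_strip_bracketed_segments : Prop := ∀ (text : String), Dom_strip_bracketed_segments text → Spec_strip_bracketed_segments text (strip_bracketed_segments text)

-- ===== LEMMAS AND PROOFS =====

-- A's loop, written as a recursion on the remaining text (out accumulator factored away)
def pvProc : Bool → List Char → List Char → List Char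
  | inb, pending, [] => if inb then [] else pending
  | inb, pending, c :: l =>
    if inb then
      if c = ']' then pvProc false pending l else pvProc true pending l
    else if c = '[' then pvProc true [] l
    else if PySem.Chars.isspace c then pvProc false (pending ++ [c]) l
    else pending ++ c :: pvProc false [] l

-- what A's in-bracket mode does: skip to the first ']' (or drop everything)
def pvSkip (pending : List Char) (l : List Char) : List Char :=
  if (l.dropWhile (fun c => !(c == ']'))) = [] then []
  else pvProc false pending (l.dropWhile (fun c => !(c == ']'))).tail

-- pvBLoop generalized by whitespace already consumed in the current chunk
def pvBAux (ws l : List Char) : List Char :=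
  if (l.dropWhile (fun c => !(c == '['))) = [] then
    ws ++ l
  else
    PySem.Chars.rstrip (ws ++ l.takeWhile (fun c => !(c == '['))) ++
      (if ((l.dropWhile (fun c => !(c == '['))).tail.dropWhile (fun c => !(c == ']'))) = [] then
        []
      else
        pvBLoop ((l.dropWhile (fun c => !(c == '['))).tail.dropWhile (fun c => !(c == ']'))).tail)

lemma pvA_char : ∀ (l : List Char) (out pending : List Char) (inb : Bool),
    pvAssemble (l.foldl pvAStep (out, pending, inb)) = out ++ pvProc inb pending l := by
  intro l
  induction l with
  | nil =>
    intro out pending inb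
    cases inb <;> by_cases hp : pending = [] <;> simp [pvAssemble, pvProc, hp]
  | cons c t ih =>
    intro out pending inb
    cases inb with
    | true =>
      by_cases hc : c = ']' <;> simp [pvAStep, pvProc, hc, ih]
    | false =>
      by_cases hb : c = '['
      · simp [pvAStep, pvProc, hb, ih]
      · by_cases hs : PySem.Chars.isspace c = true
        · simp [pvAStep, pvProc, hb, hs, ih]
        · simp [pvAStep, pvProc, hb, hs, ih, List.append_assoc]

lemma pvProc_in : ∀ (l : List Char) (pending : List Char),
    pvProc true pending l = pvSkip pending l := by
  intro l
  induction l with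
  | nil => intro pending; simp [pvProc, pvSkip]
  | cons c t ih =>
    intro pending
    by_cases hc : c = ']'
    · simp [pvProc, pvSkip, hc, List.dropWhile_cons]
    · rw [show pvProc true pending (c :: t) = pvProc true pending t by simp [pvProc, hc]]
      rw [ih]
      simp [pvSkip, List.dropWhile_cons, hc]

lemma pvDropWhile_append_cons {p : Char → Bool} {c : Char} (hc : p c = false) :
    ∀ (u v : List Char), List.dropWhile p (u ++ c :: v) = List.dropWhile p u ++ c :: v := by
  intro u v
  induction u with
  | nil => simp [List.dropWhile_cons, hc]
  | cons a u ih =>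
    by_cases ha : p a = true <;> simp [List.dropWhile_cons, ha, ih]

lemma pvRstrip_append_cons {c : Char} (hc : PySem.Chars.isspace c = false)
    (xs ys : List Char) :
    PySem.Chars.rstrip (xs ++ c :: ys) = xs ++ c :: PySem.Chars.rstrip ys := by
  simp [PySem.Chars.rstrip, List.reverse_append, List.append_assoc,
        pvDropWhile_append_cons hc]

lemma pvRstrip_space (ws : List Char) (h : ∀ c ∈ ws, PySem.Chars.isspace c = true) :
    PySem.Chars.rstrip ws = [] := by
  have : List.dropWhile PySem.Chars.isspace ws.reverse = [] := by
    rw [List.dropWhile_eq_nil_iff]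
    intro x hx
    exact h x (List.mem_reverse.mp hx)
  simp [PySem.Chars.rstrip, this]

lemma pvBAux_nil (l : List Char) : pvBAux [] l = pvBLoop l := by
  rw [pvBLoop, pvBAux]
  by_cases h : (l.dropWhile (fun c => !(c == '['))) = [] <;> simp [h]

lemma pvBAux_cons {c : Char} (hb : c ≠ '[') (ws t : List Char) :
    pvBAux ws (c :: t) = pvBAux (ws ++ [c]) t := by
  have hd : List.dropWhile (fun c => !(c == '[')) (c :: t)
      = List.dropWhile (fun c => !(c == '[')) t := by
    simp [List.dropWhile_cons, hb]
  have ht : List.takeWhile (fun c => !(c == '[')) (c :: t)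
      = c :: List.takeWhile (fun c => !(c == '[')) t := by
    simp [List.takeWhile_cons, hb]
  by_cases h : (t.dropWhile (fun c => !(c == '['))) = [] <;>
    simp [pvBAux, hd, ht, h, List.append_assoc]

lemma pvBAux_cons_nonspace {c : Char} (hb : c ≠ '[')
    (hs : PySem.Chars.isspace c = false) (ws t : List Char) :
    pvBAux ws (c :: t) = ws ++ c :: pvBAux [] t := by
  have hd : List.dropWhile (fun c => !(c == '[')) (c :: t)
      = List.dropWhile (fun c => !(c == '[')) t := by
    simp [List.dropWhile_cons, hb]
  have ht : List.takeWhile (fun c => !(c == '[')) (c :: t)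
      = c :: List.takeWhile (fun c => !(c == '[')) t := by
    simp [List.takeWhile_cons, hb]
  by_cases h : (t.dropWhile (fun c => !(c == '['))) = [] <;>
    simp [pvBAux, hd, ht, h, pvRstrip_append_cons hs, List.append_assoc]

lemma pvProc_eq_bAux : ∀ (n : Nat) (l : List Char), l.length ≤ n →
    ∀ ws : List Char, (∀ c ∈ ws, PySem.Chars.isspace c = true) →
    pvProc false ws l = pvBAux ws l := by
  intro n
  induction n with
  | zero =>
    intro l hl ws hws
    have : l = [] := List.eq_nil_of_length_eq_zero (Nat.le_zero.mp hl)
    subst this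
    simp [pvProc, pvBAux]
  | succ n ih =>
    intro l hl ws hws
    cases l with
    | nil => simp [pvProc, pvBAux]
    | cons c t =>
      have hlt : t.length ≤ n := by simp at hl; omega
      by_cases hb : c = '['
      · subst hb
        rw [show pvProc false ws ('[' :: t) = pvProc true [] t by simp [pvProc]]
        rw [pvProc_in]
        have hd : List.dropWhile (fun c => !(c == '[')) ('[' :: t) = '[' :: t := by
          simp [List.dropWhile_cons]
        have htk : List.takeWhile (fun c => !(c == '[')) ('[' :: t) = [] := by
          simp [List.takeWhile_cons]
        rw [show pvBAux ws ('[' :: t)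
            = PySem.Chars.rstrip ws ++
              (if ((t.dropWhile (fun c => !(c == ']')))) = [] then []
               else pvBLoop (t.dropWhile (fun c => !(c == ']'))).tail) by
          simp [pvBAux, hd, htk]]
        rw [pvRstrip_space ws hws]
        by_cases h2 : (t.dropWhile (fun c => !(c == ']'))) = []
        · simp [pvSkip, h2]
        · have hlen : (t.dropWhile (fun c => !(c == ']'))).tail.length ≤ n := by
            have := List.length_dropWhile_le (fun c => !(c == ']')) t
            simp only [List.length_tail]
            omega
          rw [show pvSkip [] t
              = pvProc false [] (t.dropWhile (fun c => !(c == ']'))).tail by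
            simp [pvSkip, h2]]
          rw [ih _ hlen [] (by simp)]
          simp [h2, pvBAux_nil]
      · by_cases hs : PySem.Chars.isspace c = true
        · rw [show pvProc false ws (c :: t) = pvProc false (ws ++ [c]) t by
            simp [pvProc, hb, hs]]
          rw [ih t hlt (ws ++ [c]) (by
            intro x hx
            rcases List.mem_append.mp hx with hx | hx
            · exact hws x hx
            · simp at hx; subst hx; exact hs)]
          exact (pvBAux_cons hb ws t).symm
        · rw [show pvProc false ws (c :: t) = ws ++ c :: pvProc false [] t by
            simp [pvProc, hb, hs]]
          rw [ih t hlt [] (by simp)]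
          exact (pvBAux_cons_nonspace hb (by simpa using hs) ws t).symm

-- ===== VERDICT (by name: the statement is the Claim_ definition above) =====
theorem strip_bracketed_segments_spec : Claim_equal_strip_bracketed_segments := by
  intro text _
  unfold Spec_strip_bracketed_segments strip_bracketed_segments strip_bracketed_segments_alt
  have h1 : pvAssemble (text.toList.foldl pvAStep ([], [], false))
      = pvProc false [] text.toList := by
    simpa using pvA_char text.toList [] [] false
  have h2 : pvProc false [] text.toList = pvBAux [] text.toList :=
    pvProc_eq_bAux text.toList.length text.toList le_rfl [] (by simp)
  rw [h1, h2, pvBAux_nil]
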